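-- pv_equiv track=rewrite | github.com/imagej/pyimagej | .github/scripts/update_notebook.py | order_environments
-- ===== SOURCE A (Python) =====
-- from typing import Dict
--
-- def order_environments(environment_mapping: Dict[str, str]) -> list:
--     """Return environment names in preferred order: Colab > Headless > Desktop > Script Editor."""
--     # Define preferred order based on user requirements
--     preferred_order = [
--         "Google Colab",
--         "True Headless",
--         "Interactive Desktop",
--         "Fiji Script Editor"
--     ]
--
--     # Start with preferred environments in order
--     ordered_environments = []
--     for env in preferred_order:
--         if env in environment_mapping:
--             ordered_environments.append(env)
--
--     # Add any environments not in preferred_order (future environments)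
--     remaining_environments = sorted([env for env in environment_mapping.keys() if env not in preferred_order])
--     ordered_environments.extend(remaining_environments)
--
--     return ordered_environments
-- ===== SOURCE B (Python) =====
-- def order_environments(environment_mapping):
--     """Return environment names in preferred order: Colab > Headless > Desktop > Script Editor."""
--     preferred_order = [
--         "Google Colab",
--         "True Headless",
--         "Interactive Desktop",
--         "Fiji Script Editor"
--     ]
--
--     def rank(env):
--         return (preferred_order.index(env) if env in preferred_order else len(preferred_order), env)
--
--     # One key-driven sort: preferred names get their unique index (0..3), all
--     # others rank 4 and tie-break alphabetically by name.
--     return sorted(environment_mapping, key=rank)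
-- ===== Notes on version B (the rewrite author's own statement) =====
-- stated objective: idiomatic
-- what changed: Replaces A's two-phase build (explicit membership loop over the preferred list, then a sorted comprehension of the rest) by a single sorted() call over all keys with a composite (priority-index, name) key.
import Mathlib
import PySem

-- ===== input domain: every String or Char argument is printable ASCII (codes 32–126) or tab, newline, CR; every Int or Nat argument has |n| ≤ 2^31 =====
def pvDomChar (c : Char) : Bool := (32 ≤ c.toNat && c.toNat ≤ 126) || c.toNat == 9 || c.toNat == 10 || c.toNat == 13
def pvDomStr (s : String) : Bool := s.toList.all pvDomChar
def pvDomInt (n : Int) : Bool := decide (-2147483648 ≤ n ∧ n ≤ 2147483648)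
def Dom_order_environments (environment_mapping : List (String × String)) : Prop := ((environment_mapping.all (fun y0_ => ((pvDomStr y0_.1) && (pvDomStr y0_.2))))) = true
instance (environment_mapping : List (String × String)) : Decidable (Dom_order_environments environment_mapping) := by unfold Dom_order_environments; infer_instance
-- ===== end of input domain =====

-- B replaces A's two-phase build (membership loop over the preferred list, then a
-- sorted comprehension of the rest) by ONE sorted() call with a composite
-- (priority-index, name) key — more idiomatic, same return value.

-- ===== PORT A =====
-- the literal preferred_order list (same in Source A and Source B)
def pvPreferredA : List String :=
  ["Google Colab", "True Headless", "Interactive Desktop", "Fiji Script Editor"]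

def order_environments (environment_mapping : List (String × String)) : List String :=
  let d := PySem.Dict.ofList environment_mapping
  -- for env in preferred_order: if env in environment_mapping: append
  let ordered := pvPreferredA.foldl
    (fun acc env => if d.contains env then acc ++ [env] else acc) []
  -- sorted([env for env in keys if env not in preferred_order])
  let remaining := PySem.List.sorted
    (d.keys.filter (fun env => decide (env ∉ pvPreferredA))) (fun x => x) false
  ordered ++ remaining

-- ===== PORT B =====
-- rank(env) = preferred_order.index(env) if env in preferred_order else len(preferred_order)
def pvRank (env : String) : Nat :=
  (PySem.List.index? pvPreferredA env).getD pvPreferredA.length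

def order_environments_alt (environment_mapping : List (String × String)) : List String :=
  PySem.List.sorted2 (PySem.Dict.ofList environment_mapping).keys
    pvRank (fun env => env) false

-- ===== PRECONDITION & SPEC =====
def Spec_order_environments (environment_mapping : List (String × String)) (out : List String) : Prop := out = order_environments_alt environment_mapping
instance (environment_mapping : List (String × String)) (out : List String) : Decidable (Spec_order_environments environment_mapping out) := by unfold Spec_order_environments; infer_instance

-- ===== CLAIM (what is proved, stated in full; the proofs are below) =====
def Claim_equal_order_environments : Prop := ∀ (environment_mapping : List (String × String)), Dom_order_environments environment_mapping → Spec_order_environments environment_mapping (order_environments environment_mapping)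

-- ===== LEMMAS AND PROOFS =====

-- the composite key, as one lexicographically ordered value
def pvKey (env : String) : ℕ ×ₗ String := toLex (pvRank env, env)

-- sorted2 with keys (pvRank, id) is sorted with the lex key pvKey
theorem pv_sorted2_eq_sorted (xs : List String) :
    PySem.List.sorted2 xs pvRank (fun env => env) false
      = PySem.List.sorted xs pvKey false := by
  simp only [PySem.List.sorted2, PySem.List.sorted_eq_foldl_insertBy]
  congr 1
  funext acc x
  congr 1
  funext a b
  by_cases h1 : pvRank a < pvRank b
  · simp [h1, Prod.Lex.lt_iff, pvKey]
  · by_cases h2 : pvRank b < pvRank a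
    · simp [h1, h2, Prod.Lex.lt_iff, pvKey, (Nat.ne_of_lt h2).symm]
    · have he : pvRank a = pvRank b := Nat.le_antisymm (Nat.le_of_not_lt h2) (Nat.le_of_not_lt h1)
      simp [Prod.Lex.lt_iff, pvKey, he]

theorem pv_rank_of_not_mem {e : String} (h : e ∉ pvPreferredA) : pvRank e = 4 := by
  have hn : PySem.List.index? pvPreferredA e = none := by
    rw [PySem.List.index?_eq_none_iff]; exact h
  unfold pvRank
  rw [hn]
  rfl

theorem pv_rank_lt_of_mem {e : String} (h : e ∈ pvPreferredA) : pvRank e < 4 := by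
  fin_cases h <;> decide

theorem pv_pref_pairwise : pvPreferredA.Pairwise (fun a b => pvKey a < pvKey b) := by
  have h : ∀ a b : String, pvRank a < pvRank b → pvKey a < pvKey b := by
    intro a b hab; simp only [pvKey, Prod.Lex.lt_iff, ofLex_toLex]; exact Or.inl hab
  simp only [pvPreferredA]
  refine List.Pairwise.cons ?_ (List.Pairwise.cons ?_ (List.Pairwise.cons ?_ (List.pairwise_singleton _ _))) <;>
    (intro b hb; fin_cases hb <;> exact h _ _ (by decide))

theorem order_environments_spec : Claim_equal_order_environments := by
  intro m _
  unfold Spec_order_environments order_environments order_environments_alt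
  rw [pv_sorted2_eq_sorted]
  simp only []
  set d := PySem.Dict.ofList m with hd
  set ks := d.keys with hks
  have hnd : ks.Nodup := PySem.Dict.nodup_keys_ofList m
  set part1 := pvPreferredA.filter (fun e => d.contains e) with hp1
  set rest := ks.filter (fun env => decide (env ∉ pvPreferredA)) with hrest
  set part2 := PySem.List.sorted rest (fun x => x) false with hp2
  have hfold : pvPreferredA.foldl (fun acc env => if d.contains env then acc ++ [env] else acc) [] = part1 := by
    have := PySem.List.foldl_append_if (fun e => d.contains e) (fun e => e) pvPreferredA []
    simpa using this
  rw [hfold]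
  -- mem facts
  have hcont : ∀ e, d.contains e = decide (e ∈ ks) := fun e => PySem.Dict.contains_eq_decide_mem_keys d e
  have hmem1 : ∀ e, e ∈ part1 ↔ e ∈ pvPreferredA ∧ e ∈ ks := by
    intro e; rw [hp1, List.mem_filter, hcont]; simp
  have hmemrest : ∀ e, e ∈ rest ↔ e ∈ ks ∧ e ∉ pvPreferredA := by
    intro e; rw [hrest, List.mem_filter]; simp
  have hmem2 : ∀ e, e ∈ part2 ↔ e ∈ ks ∧ e ∉ pvPreferredA := by
    intro e
    rw [hp2, ← hmemrest]
    exact (PySem.List.sorted_perm rest (fun x => x) false).mem_iff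
  -- permutation
  have hperm : (part1 ++ part2).Perm ks := by
    rw [List.perm_ext_iff_of_nodup ?_ hnd]
    · intro a
      rw [List.mem_append, hmem1, hmem2]
      by_cases hp : a ∈ pvPreferredA <;> simp [hp]
    · refine List.Nodup.append ?_ ?_ ?_
      · exact (by decide : pvPreferredA.Nodup).filter _
      · exact (PySem.List.sorted_perm rest (fun x => x) false).symm.nodup (hnd.filter _)
      · intro a ha hb
        exact ((hmem2 a).1 hb).2 ((hmem1 a).1 ha).1
  -- pairwise strictly increasing under pvKey
  have hpair : (part1 ++ part2).Pairwise (fun a b => pvKey a < pvKey b) := by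
    rw [List.pairwise_append]
    refine ⟨?_, ?_, ?_⟩
    · exact List.Pairwise.sublist List.filter_sublist pv_pref_pairwise
    · have hle : part2.Pairwise (fun a b => a ≤ b) := PySem.List.sorted_pairwise rest (fun x => x)
      have hne : part2.Pairwise (fun a b => a ≠ b) :=
        (PySem.List.sorted_perm rest (fun x => x) false).symm.nodup (hnd.filter _)
      refine (hle.and hne).imp_of_mem ?_
      intro a b ha hb hab
      simp only [pvKey, Prod.Lex.lt_iff, ofLex_toLex]
      refine Or.inr ⟨?_, lt_of_le_of_ne hab.1 hab.2⟩
      rw [pv_rank_of_not_mem ((hmem2 a).1 ha).2, pv_rank_of_not_mem ((hmem2 b).1 hb).2]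
    · intro a ha b hb
      simp only [pvKey, Prod.Lex.lt_iff, ofLex_toLex]
      left
      have := pv_rank_lt_of_mem ((hmem1 a).1 ha).1
      rw [pv_rank_of_not_mem ((hmem2 b).1 hb).2]
      omega
  exact (PySem.List.sorted_eq_of_perm_of_pairwise_lt ks (part1 ++ part2) pvKey hperm hpair).symm
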